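-- pv_equiv track=rewrite | github.com/fe6471/algonote | bit manipulation/leetcode_371_SumOfTwoIntegers.py | getSum
-- ===== SOURCE A (Python) =====
-- def getSum(a: int, b: int) -> int:
--     mask = 0xFFFFFFFF
--     a = a & mask
--
--     while b:
--         carry = ((a & b) << 1) & mask
--         a = (a ^ b) & mask
--         b = carry
--
--     if (a>>31) & 1:
--         a = ~(a ^ mask)
--     return a
-- ===== SOURCE B (Python) =====
-- def getSum(a: int, b: int) -> int:
--     s = (a + b) & 0xFFFFFFFF
--     return s - 0x100000000 if s & 0x80000000 else s
-- ===== Notes on version B (the rewrite author's own statement) =====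
-- stated objective: simpler
-- what changed: Replaces A's bitwise carry-propagation while-loop with a closed form: mask the native sum to 32 bits and sign-extend at bit 31.
import Mathlib
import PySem

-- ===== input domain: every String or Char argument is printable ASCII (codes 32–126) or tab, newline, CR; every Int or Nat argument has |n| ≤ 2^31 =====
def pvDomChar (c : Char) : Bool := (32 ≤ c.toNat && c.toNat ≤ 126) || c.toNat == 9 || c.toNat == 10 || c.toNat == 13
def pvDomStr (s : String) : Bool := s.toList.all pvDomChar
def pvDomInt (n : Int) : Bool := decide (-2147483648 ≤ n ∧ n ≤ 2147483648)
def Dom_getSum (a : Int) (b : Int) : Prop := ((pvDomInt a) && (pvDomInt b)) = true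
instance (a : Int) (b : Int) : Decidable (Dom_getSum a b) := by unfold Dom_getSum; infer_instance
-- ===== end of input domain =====

-- B replaces A's bitwise carry-propagation loop by a closed form (mask the native
-- sum to 32 bits, then sign-extend at bit 31); objective: simpler.

-- ===== PORT A =====
-- A's while-loop; the fuel (40) only makes the recursion total — on every input of
-- Dom_getSum the loop exits (b = 0) before the fuel runs out, as the proof below shows.
def getSumLoop : Nat → Int → Int → Int
  | 0, a, _ => a
  | fuel+1, a, b =>
      if b ≠ 0 then
        getSumLoop fuel (PySem.Int.band (PySem.Int.bxor a b) 4294967295)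
          (PySem.Int.band ((PySem.Int.band a b) <<< (1:Nat)) 4294967295)
      else a

def getSum (a : Int) (b : Int) : Int :=
  let mask : Int := 4294967295
  let a1 := PySem.Int.band a mask
  let a2 := getSumLoop 40 a1 b
  if PySem.Int.band (a2 >>> (31:Nat)) 1 ≠ 0 then Int.not (PySem.Int.bxor a2 mask) else a2

-- ===== PORT B =====
def getSum_alt (a : Int) (b : Int) : Int :=
  let s := PySem.Int.band (a + b) 4294967295
  if PySem.Int.band s 2147483648 ≠ 0 then s - 4294967296 else s

-- ===== PRECONDITION & SPEC =====
def Spec_getSum (a : Int) (b : Int) (out : Int) : Prop := out = getSum_alt a b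
instance (a : Int) (b : Int) (out : Int) : Decidable (Spec_getSum a b out) := by unfold Spec_getSum; infer_instance

-- ===== CLAIM (what is proved, stated in full; the proofs are below) =====
def Claim_equal_getSum : Prop := ∀ (a : Int) (b : Int), Dom_getSum a b → Spec_getSum a b (getSum a b)

-- ===== LEMMAS AND PROOFS =====

-- (a &&& b) % 2 = (a % 2) * (b % 2) on Nat
theorem pv_and_mod_two (a b : Nat) : (a &&& b) % 2 = a % 2 * (b % 2) := by
  have h1 : (a &&& b) % 2 = (a &&& b) &&& 1 := (Nat.and_one_is_mod _).symm
  have h2 : (a &&& b) &&& 1 = a &&& (b &&& 1) := Nat.and_assoc a b 1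
  have h3 : b &&& 1 = b % 2 := Nat.and_one_is_mod b
  rcases Nat.mod_two_eq_zero_or_one b with h|h
  · simp [h1, h2, h3, h]
  · simp [h1, h2, h3, h, Nat.and_one_is_mod]

-- (a ||| b) % 2 = max (a % 2) (b % 2) on Nat
theorem pv_or_mod_two (a b : Nat) : (a ||| b) % 2 = max (a % 2) (b % 2) := by
  have h1 : (a ||| b) % 2 = (a ||| b) &&& 1 := (Nat.and_one_is_mod _).symm
  have h2 : (a ||| b) &&& 1 = (a &&& 1) ||| (b &&& 1) := Nat.and_or_distrib_right a b 1
  have h3 : a &&& 1 = a % 2 := Nat.and_one_is_mod a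
  have h4 : b &&& 1 = b % 2 := Nat.and_one_is_mod b
  rcases Nat.mod_two_eq_zero_or_one a with h|h <;> rcases Nat.mod_two_eq_zero_or_one b with h'|h' <;>
    simp [h1, h2, h3, h4, h, h']

-- the ripple-carry identity on Nat: a + b = xor + twice the and
theorem pv_xor_and_add (a b : Nat) : (a ^^^ b) + 2*(a &&& b) = a + b := by
  induction a using Nat.strong_induction_on generalizing b with
  | _ a ih =>
    rcases Nat.eq_zero_or_pos a with rfl|ha
    · simp
    have h2 : a / 2 < a := Nat.div_lt_self ha (by norm_num)
    have hx := Nat.xor_div_two (a := a) (b := b)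
    have hand := Nat.and_div_two (a := a) (b := b)
    have hxm := Nat.xor_mod_two_eq (m := a) (n := b)
    have ham := pv_and_mod_two a b
    have e1 := ih (a/2) h2 (b/2)
    rcases Nat.mod_two_eq_zero_or_one a with h|h <;> rcases Nat.mod_two_eq_zero_or_one b with h'|h' <;>
      rw [h, h'] at ham <;> omega

-- a + b = or + and on Nat
theorem pv_or_and_add (a b : Nat) : (a ||| b) + (a &&& b) = a + b := by
  induction a using Nat.strong_induction_on generalizing b with
  | _ a ih =>
    rcases Nat.eq_zero_or_pos a with rfl|ha
    · simp
    have h2 : a / 2 < a := Nat.div_lt_self ha (by norm_num)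
    have ho := Nat.or_div_two (a := a) (b := b)
    have hand := Nat.and_div_two (a := a) (b := b)
    have hom := pv_or_mod_two a b
    have ham := pv_and_mod_two a b
    have e1 := ih (a/2) h2 (b/2)
    rcases Nat.mod_two_eq_zero_or_one a with h|h <;> rcases Nat.mod_two_eq_zero_or_one b with h'|h' <;>
      rw [h, h'] at ham hom <;> omega

theorem pv_not_eq (x : Int) : Int.not x = -x - 1 := by
  cases x <;> simp [Int.not, Int.negSucc_eq] <;> try ring

-- x & 0xFFFFFFFF is x mod 2^32, for EVERY Int x (Python's infinite two's complement)
theorem pv_band_mask (x : Int) : PySem.Int.band x 4294967295 = x % 4294967296 := by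
  by_cases hx : 0 ≤ x
  · rw [PySem.Int.band_of_nonneg hx (by norm_num)]
    have ht : (4294967295 : Int).toNat = 2^32 - 1 := by decide
    rw [ht, Nat.and_two_pow_sub_one_eq_mod]
    omega
  · unfold PySem.Int.band
    rw [if_neg hx, if_pos (by norm_num)]
    have h1 : (4294967295 : Int).toNat = 2^32 - 1 := by decide
    have h2 : (2^32 - 1) &&& (-x - 1).toNat = (-x - 1).toNat % 2^32 := by
      rw [Nat.and_comm]
      exact Nat.and_two_pow_sub_one_eq_mod (-x - 1).toNat 32
    rw [h1, h2]
    omega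

-- the ripple-carry identity on Int, all signs (Python's infinite two's complement)
theorem pv_int_xor_and_add (a b : Int) :
    PySem.Int.bxor a b + 2 * PySem.Int.band a b = a + b := by
  unfold PySem.Int.bxor PySem.Int.band
  by_cases ha : 0 ≤ a <;> by_cases hb : 0 ≤ b
  · rw [if_pos ha, if_pos hb, if_pos ha, if_pos hb]
    have := pv_xor_and_add a.toNat b.toNat
    omega
  · rw [if_pos ha, if_neg hb, if_pos ha, if_neg hb]
    have := pv_xor_and_add a.toNat (-b - 1).toNat
    have hle : a.toNat &&& (-b - 1).toNat ≤ a.toNat := Nat.and_le_left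
    omega
  · rw [if_neg ha, if_pos hb, if_neg ha, if_pos hb]
    have := pv_xor_and_add (-a - 1).toNat b.toNat
    rw [Nat.and_comm] at this
    have hle : b.toNat &&& (-a - 1).toNat ≤ b.toNat := Nat.and_le_left
    omega
  · rw [if_neg ha, if_neg hb, if_neg ha, if_neg hb]
    have hx := pv_xor_and_add (-a - 1).toNat (-b - 1).toNat
    have ho := pv_or_and_add (-a - 1).toNat (-b - 1).toNat
    omega

-- 2^m divides (x &&& y) whenever it divides y (Nat)
theorem pv_dvd_and (m x y : Nat) (h : 2^m ∣ y) : 2^m ∣ (x &&& y) := by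
  have h0 : (x &&& y) % 2^m = (x &&& y) &&& (2^m - 1) := (Nat.and_two_pow_sub_one_eq_mod _ m).symm
  have h1 : (x &&& y) &&& (2^m - 1) = x &&& (y &&& (2^m - 1)) := Nat.and_assoc _ _ _
  have h2 : y &&& (2^m - 1) = y % 2^m := Nat.and_two_pow_sub_one_eq_mod y m
  have h3 : y % 2^m = 0 := Nat.mod_eq_zero_of_dvd h
  exact Nat.dvd_of_mod_eq_zero (by rw [h0, h1, h2, h3]; simp)

-- the loop computes (a + b) % 2^32 once b is a nonnegative masked carry
theorem pv_loop_inv (k : Nat) : ∀ (fuel : Nat) (a b : Int), k + 1 ≤ fuel →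
    0 ≤ a → a < 4294967296 → 0 ≤ b → b < 4294967296 → ((2:Int)^(32-k) ∣ b) →
    getSumLoop fuel a b = (a + b) % 4294967296 := by
  induction k with
  | zero =>
    intro fuel a b hf ha0 ha1 hb0 hb1 hdvd
    have hpow : ((2:Int)^(32-0)) = 4294967296 := by norm_num
    rw [hpow] at hdvd
    rcases hdvd with ⟨c, hc⟩
    have hc0 : 0 ≤ c := by nlinarith
    have hc1 : c < 1 := by nlinarith
    have hb : b = 0 := by omega
    obtain ⟨f, rfl⟩ : ∃ f, fuel = f + 1 := ⟨fuel - 1, by omega⟩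
    subst hb
    simp [getSumLoop]
    omega
  | succ k ih =>
    intro fuel a b hf ha0 ha1 hb0 hb1 hdvd
    obtain ⟨f, rfl⟩ : ∃ f, fuel = f + 1 := ⟨fuel - 1, by omega⟩
    by_cases hb : b = 0
    · subst hb; simp [getSumLoop]; omega
    · rw [getSumLoop, if_pos hb]
      rw [pv_band_mask, pv_band_mask, Int.shiftLeft_eq]
      set a' := PySem.Int.bxor a b % 4294967296 with ha'
      set b' := PySem.Int.band a b * 2^1 % 4294967296 with hb'
      have hM : (0:Int) < 4294967296 := by norm_num
      have ha'0 : 0 ≤ a' := Int.emod_nonneg _ (by norm_num)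
      have ha'1 : a' < 4294967296 := Int.emod_lt_of_pos _ hM
      have hb'0 : 0 ≤ b' := Int.emod_nonneg _ (by norm_num)
      have hb'1 : b' < 4294967296 := Int.emod_lt_of_pos _ hM
      -- divisibility of the new carry by 2^(32-k)
      have hdvd' : (2:Int)^(32-k) ∣ b' := by
        by_cases hk : 32 ≤ k
        · have h0 : 32 - k = 0 := by omega
          rw [h0]; simp
        · have hband : (2:Int)^(32-(k+1)) ∣ PySem.Int.band a b := by
            have hyN : 2^(32-(k+1)) ∣ b.toNat := by
              have hb' : ((b.toNat : Int)) = b := Int.toNat_of_nonneg hb0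
              have hcast : ((2:Int)^(32-(k+1))) = ((2^(32-(k+1)) : Nat) : Int) := by push_cast; ring
              rw [hcast, ← hb'] at hdvd
              exact_mod_cast hdvd
            have hN := pv_dvd_and (32-(k+1)) a.toNat b.toNat hyN
            rw [PySem.Int.band_of_nonneg ha0 hb0]
            have hcast : ((2:Int)^(32-(k+1))) = ((2^(32-(k+1)) : Nat) : Int) := by push_cast; ring
            rw [hcast]
            exact_mod_cast hN
          have hmul : (2:Int)^(32-k) ∣ PySem.Int.band a b * 2^1 := by
            rcases hband with ⟨c, hc⟩
            refine ⟨c, ?_⟩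
            rw [hc]
            have h32 : 32 - k = (32 - (k+1)) + 1 := by omega
            rw [h32, pow_succ]; ring
          have hMdvd : (2:Int)^(32-k) ∣ 4294967296 := by
            have h32 : (4294967296:Int) = 2^32 := by norm_num
            rw [h32]
            exact pow_dvd_pow 2 (by omega)
          rw [hb', Int.emod_def]
          exact dvd_sub hmul (Dvd.dvd.mul_right hMdvd _)
      have hres := ih f a' b' (by omega) ha'0 ha'1 hb'0 hb'1 hdvd'
      rw [hres, ha', hb']
      have hsum := pv_int_xor_and_add a b
      rw [Int.add_emod (PySem.Int.bxor a b % 4294967296)]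
      rw [Int.emod_emod_of_dvd _ (dvd_refl _), Int.emod_emod_of_dvd _ (dvd_refl _)]
      rw [← Int.add_emod]
      congr 1
      omega

-- x ^ 0xFFFFFFFF = 0xFFFFFFFF - x for 0 ≤ x < 2^32
theorem pv_bxor_mask (x : Int) (h0 : 0 ≤ x) (h1 : x < 4294967296) :
    PySem.Int.bxor x 4294967295 = 4294967295 - x := by
  have h := pv_int_xor_and_add x 4294967295
  have hband : PySem.Int.band x 4294967295 = x := by
    rw [pv_band_mask]; omega
  omega

-- the whole loop of A computes (a + b) % 2^32 on inputs of Dom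
theorem pv_loop_final (a b : Int) (hb0 : -4294967296 < b) (hb1 : b < 4294967296) :
    getSumLoop 40 (PySem.Int.band a 4294967295) b = (a + b) % 4294967296 := by
  rw [pv_band_mask]
  set a1 := a % 4294967296 with ha1
  have hM : (0:Int) < 4294967296 := by norm_num
  have ha10 : 0 ≤ a1 := Int.emod_nonneg _ (by norm_num)
  have ha11 : a1 < 4294967296 := Int.emod_lt_of_pos _ hM
  by_cases hb : b = 0
  · subst hb
    simp [getSumLoop]
    exact ha1
  · rw [getSumLoop, if_pos hb, pv_band_mask, pv_band_mask, Int.shiftLeft_eq]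
    set a' := PySem.Int.bxor a1 b % 4294967296 with ha'
    set b' := PySem.Int.band a1 b * 2^1 % 4294967296 with hb'
    have ha'0 : 0 ≤ a' := Int.emod_nonneg _ (by norm_num)
    have ha'1 : a' < 4294967296 := Int.emod_lt_of_pos _ hM
    have hb'0 : 0 ≤ b' := Int.emod_nonneg _ (by norm_num)
    have hb'1 : b' < 4294967296 := Int.emod_lt_of_pos _ hM
    have hdvd : (2:Int)^(32-32) ∣ b' := by simp
    have hres := pv_loop_inv 32 39 a' b' (by omega) ha'0 ha'1 hb'0 hb'1 hdvd
    rw [hres, ha', hb']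
    have hsum := pv_int_xor_and_add a1 b
    rw [Int.add_emod (PySem.Int.bxor a1 b % 4294967296)]
    rw [Int.emod_emod_of_dvd _ (dvd_refl _), Int.emod_emod_of_dvd _ (dvd_refl _)]
    rw [← Int.add_emod]
    have step : PySem.Int.bxor a1 b + PySem.Int.band a1 b * 2^1 = a1 + b := by omega
    rw [step, ha1, Int.add_emod, Int.emod_emod_of_dvd _ (dvd_refl _), ← Int.add_emod]

-- ===== VERDICT (by name: the statement is the Claim_ definition above) =====
theorem getSum_spec : Claim_equal_getSum := by
  intro a b hdom
  have hdom' : -2147483648 ≤ b ∧ b ≤ 2147483648 := by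
    unfold Dom_getSum pvDomInt at hdom
    simp at hdom
    exact hdom.2
  unfold Spec_getSum
  simp only [getSum, getSum_alt]
  have hloop := pv_loop_final a b (by omega) (by omega)
  rw [hloop, pv_band_mask]
  set s := (a + b) % 4294967296 with hs
  have hM : (0:Int) < 4294967296 := by norm_num
  have hs0 : 0 ≤ s := Int.emod_nonneg _ (by norm_num)
  have hs1 : s < 4294967296 := Int.emod_lt_of_pos _ hM
  -- the two sign tests agree: bit 31 of s is set iff s ≥ 2^31
  have hshift : s >>> (31:Nat) = s / 2147483648 := by
    rw [Int.shiftRight_eq_div_pow]; norm_num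
  have htestA : (PySem.Int.band (s >>> (31:Nat)) 1 ≠ 0) ↔ 2147483648 ≤ s := by
    rw [hshift, PySem.Int.band_of_nonneg (Int.ediv_nonneg hs0 (by norm_num)) (by norm_num)]
    have h1 : (1:Int).toNat = 1 := rfl
    rw [h1, Nat.and_one_is_mod]
    omega
  have htestB : (PySem.Int.band s 2147483648 ≠ 0) ↔ 2147483648 ≤ s := by
    rw [PySem.Int.band_of_nonneg hs0 (by norm_num)]
    have h31 : (2147483648 : Int).toNat = 2^31 := by decide
    rw [h31, Nat.and_two_pow]
    have hbit : s.toNat.testBit 31 = decide ((s.toNat >>> 31) % 2 = 1) := by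
      simp [Nat.testBit]
    rw [hbit]
    have hsr : s.toNat >>> 31 = s.toNat / 2^31 := Nat.shiftRight_eq_div_pow _ _
    rcases Nat.mod_two_eq_zero_or_one (s.toNat >>> 31) with h|h <;> simp [h] <;> omega
  by_cases hcond : 2147483648 ≤ s
  · rw [if_pos (htestA.2 hcond), if_pos (htestB.2 hcond)]
    rw [pv_bxor_mask s hs0 hs1, pv_not_eq]
    ring
  · rw [if_neg (fun h => hcond (htestA.1 h)), if_neg (fun h => hcond (htestB.1 h))]
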